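-- pv_equiv track=rewrite | github.com/blhwong/algos_py | grokking_dp/palindromic_subsequence/longest_palindromic_subsequence/main.py | find_lps_length
-- ===== SOURCE A (Python) =====
-- def find_lps_length(s):
--     subsequences = set()
--     for i in range(len(s)):
--         for j in range(len(s)):
--             subsequences.add(s[0:i] + s[i + j + 1:])
--
--     ans = 1
--
--     for sub in subsequences:
--         if is_palindrome(sub):
--             ans = max(ans, len(sub))
--
--     return ans
--
-- def is_palindrome(s):
--     left, right = 0, len(s) - 1
--     while left < right:
--         if s[left] != s[right]:
--             return False
--         left += 1
--         right -= 1
--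
--     return True
-- ===== SOURCE B (Python) =====
-- def find_lps_length(s):
--     # Search kept lengths in descending order; first palindromic cut found is the answer.
--     n = len(s)
--     for L in range(n - 1, 0, -1):
--         for p in range(L + 1):
--             t = s[:p] + s[n - L + p:]
--             if t == t[::-1]:
--                 return L
--     return 1
-- ===== Notes on version B (the rewrite author's own statement) =====
-- stated objective: alternative
-- what changed: A materialises the set of all strings obtained by deleting one contiguous block and then scans it keeping a running max over palindromic members; B never builds that set: it enumerates kept lengths L = n-1 down to 1 and, for each, the prefix/suffix splits directly, returning the first L whose cut is a palindrome (checked by comparing with the reversed string instead of A's two-pointer loop).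
import Mathlib
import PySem

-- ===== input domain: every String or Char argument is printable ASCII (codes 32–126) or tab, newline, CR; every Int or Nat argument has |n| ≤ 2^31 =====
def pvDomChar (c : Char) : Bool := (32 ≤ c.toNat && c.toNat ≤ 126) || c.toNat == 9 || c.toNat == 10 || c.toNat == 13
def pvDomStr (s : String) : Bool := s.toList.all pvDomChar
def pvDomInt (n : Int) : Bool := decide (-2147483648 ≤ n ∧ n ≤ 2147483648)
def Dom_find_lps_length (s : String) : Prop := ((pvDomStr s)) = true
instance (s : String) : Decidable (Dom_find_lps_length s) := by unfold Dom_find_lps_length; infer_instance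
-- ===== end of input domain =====

-- B replaces A's set-of-all-cuts + running-max scan by a descending search over kept
-- lengths that returns the first palindromic prefix+suffix cut (objective: alternative).


-- ===== PORT A =====
-- while left < right: compare s[left], s[right] (pyGet?; the `| _, _ => false` arm is
-- unreachable for the in-range indices A reaches)
def palLoop (cl : List Char) (left right : Int) : Bool :=
  if _h : left < right then
    match PySem.List.pyGet? cl left, PySem.List.pyGet? cl right with
    | some a, some b => if a ≠ b then false else palLoop cl (left + 1) (right - 1)
    | _, _ => false
  else true
termination_by (right - left).toNat
decreasing_by omega

def is_palindrome (t : List Char) : Bool := palLoop t 0 ((t.length : Int) - 1)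

-- s[0:i] + s[i + j + 1:]
def candA (cl : List Char) (i j : Int) : List Char :=
  PySem.List.slice cl (some 0) (some i) ++ PySem.List.slice cl (some (i + j + 1)) none

def find_lps_length (s : String) : Int :=
  let cl := s.toList
  let n : Int := cl.length
  let subsequences : PySem.Set (List Char) :=
    (PySem.List.pyRange 0 n 1).foldl (fun acc i =>
      (PySem.List.pyRange 0 n 1).foldl (fun acc2 j => PySem.Set.add acc2 (candA cl i j)) acc)
      PySem.Set.empty
  -- 'for sub in subsequences': the running max is independent of the set's iteration order
  subsequences.foldl (fun ans sub => if is_palindrome sub then max ans (sub.length : Int) else ans) 1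

-- ===== PORT B =====
-- s[:p] + s[n - L + p:]
def cutB (cl : List Char) (n L p : Int) : List Char :=
  PySem.List.slice cl none (some p) ++ PySem.List.slice cl (some (n - L + p)) none

-- inner 'for p in range(L + 1): if t == t[::-1]: return L'  (t[::-1] is t.reverse:
-- PySem.List.slice?_none_none_neg_one)
def rowPal (cl : List Char) (n L : Int) : Bool :=
  (PySem.List.pyRange 0 (L + 1) 1).any (fun p => cutB cl n L p == (cutB cl n L p).reverse)

-- outer 'for L in range(n - 1, 0, -1)' with early return, falling through to 1
def altOuter (cl : List Char) (n : Int) : List Int → Int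
  | [] => 1
  | L :: rest => if rowPal cl n L then L else altOuter cl n rest

def find_lps_length_alt (s : String) : Int :=
  let cl := s.toList
  let n : Int := cl.length
  altOuter cl n (PySem.List.pyRange (n - 1) 0 (-1))

-- ===== PRECONDITION & SPEC =====
def Spec_find_lps_length (s : String) (out : Int) : Prop := out = find_lps_length_alt s
instance (s : String) (out : Int) : Decidable (Spec_find_lps_length s out) := by unfold Spec_find_lps_length; infer_instance

-- ===== CLAIM (what is proved, stated in full; the proofs are below) =====
def Claim_equal_find_lps_length : Prop := ∀ (s : String), Dom_find_lps_length s → Spec_find_lps_length s (find_lps_length s)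

-- ===== LEMMAS AND PROOFS =====

-- A's two-pointer loop, characterised over Nat indices
theorem palLoop_iff (cl : List Char) (d : Nat) : ∀ (a b : Nat), b - a ≤ d → b < cl.length →
    (palLoop cl (a : Int) (b : Int) = true ↔
      ∀ i : Nat, a ≤ i → 2 * i < a + b → cl[i]? = cl[a + b - i]?) := by
  induction d with
  | zero =>
    intro a b hd hb
    rw [palLoop, dif_neg (by exact_mod_cast not_lt.mpr (by omega : b ≤ a))]
    exact ⟨fun _ i hi h2 => absurd h2 (by omega), fun _ => rfl⟩
  | succ d ih =>
    intro a b hd hb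
    by_cases hab : a < b
    · have hab' : (a : Int) < (b : Int) := by exact_mod_cast hab
      have haL : a < cl.length := by omega
      rw [palLoop, dif_pos hab', PySem.List.pyGet?_natCast, PySem.List.pyGet?_natCast,
          List.getElem?_eq_getElem haL, List.getElem?_eq_getElem hb]
      show (if cl[a]'haL ≠ cl[b]'hb then false else palLoop cl ((a : Int) + 1) ((b : Int) - 1)) = true ↔
        ∀ i : Nat, a ≤ i → 2 * i < a + b → cl[i]? = cl[a + b - i]?
      have hc1 : ((a : Int) + 1) = ((a + 1 : Nat) : Int) := by push_cast; ring
      have hc2 : ((b : Int) - 1) = ((b - 1 : Nat) : Int) := by omega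
      rw [hc1, hc2]
      by_cases hc : cl[a]'haL = cl[b]'hb
      · rw [if_neg (not_not_intro hc), ih (a + 1) (b - 1) (by omega) (by omega)]
        constructor
        · intro h i hi h2
          rcases Nat.eq_or_lt_of_le hi with rfl | hlt
          · rw [show a + b - a = b from by omega, List.getElem?_eq_getElem haL,
                List.getElem?_eq_getElem hb, hc]
          · have := h i (by omega) (by omega)
            rwa [show (a + 1) + (b - 1) - i = a + b - i from by omega] at this
        · intro h i hi h2
          rw [show (a + 1) + (b - 1) - i = a + b - i from by omega]
          exact h i (by omega) (by omega)
      · rw [if_pos hc]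
        simp only [Bool.false_eq_true, false_iff]
        intro h
        have := h a (le_refl a) (by omega)
        rw [show a + b - a = b from by omega, List.getElem?_eq_getElem haL,
            List.getElem?_eq_getElem hb] at this
        exact hc (Option.some.inj this)
    · rw [palLoop, dif_neg (by exact_mod_cast hab)]
      exact ⟨fun _ i hi h2 => absurd h2 (by omega), fun _ => rfl⟩

theorem is_palindrome_eq (t : List Char) : is_palindrome t = (t == t.reverse) := by
  have hiff : is_palindrome t = true ↔ t = t.reverse := by
    cases t with
    | nil => simp [is_palindrome, palLoop]
    | cons c cs =>
      have hL : ((c :: cs).length : Int) - 1 = ((cs.length : Nat) : Int) := by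
        push_cast [List.length_cons]; ring
      rw [is_palindrome, hL, show (0 : Int) = ((0 : Nat) : Int) from rfl,
          palLoop_iff (c :: cs) cs.length 0 cs.length (by omega) (by simp)]
      simp only [Nat.zero_add, Nat.zero_le, true_implies]
      set m := cs.length with hm
      have hlen : (c :: cs).length = m + 1 := by simp [hm]
      constructor
      · intro h
        apply List.ext_getElem?
        intro i
        by_cases him : i < m + 1
        · rw [List.getElem?_reverse (by omega : i < (c :: cs).length),
              show (c :: cs).length - 1 - i = m - i from by omega]
          rcases lt_trichotomy (2 * i) m with hlt | heq | hgt
          · exact h i hlt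
          · rw [show m - i = i from by omega]
          · have hj := h (m - i) (by omega)
            rw [show m - (m - i) = i from by omega] at hj
            exact hj.symm
        · rw [List.getElem?_eq_none (by omega : (c :: cs).length ≤ i),
              List.getElem?_eq_none (by simp; omega)]
      · intro h i h2
        have hrev := congrArg (fun l => l[i]?) h
        simp only at hrev
        rw [List.getElem?_reverse (by omega : i < (c :: cs).length),
            show (c :: cs).length - 1 - i = m - i from by omega] at hrev
        exact hrev
  by_cases h : t = t.reverse
  · rw [hiff.mpr h]
    exact (beq_iff_eq.mpr h).symm
  · rw [Bool.eq_false_iff.mpr (fun hh => h (hiff.mp hh))]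
    exact (beq_eq_false_iff_ne.mpr h).symm

-- membership in a fold of set-inserting steps
theorem mem_foldl_acc {α : Type} [BEq α] [LawfulBEq α] (g : PySem.Set α → Int → PySem.Set α)
    (Q : Int → α → Prop) (hg : ∀ s i x, x ∈ g s i ↔ x ∈ s ∨ Q i x) (l : List Int)
    (s0 : PySem.Set α) (x : α) :
    (x ∈ l.foldl g s0 ↔ x ∈ s0 ∨ ∃ i ∈ l, Q i x) := by
  induction l generalizing s0 with
  | nil => simp
  | cons i rest ih =>
    simp only [List.foldl_cons, ih, hg, List.mem_cons]
    constructor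
    · rintro ((h | h) | ⟨j, hj, hq⟩)
      · exact Or.inl h
      · exact Or.inr ⟨i, Or.inl rfl, h⟩
      · exact Or.inr ⟨j, Or.inr hj, hq⟩
    · rintro (h | ⟨j, (rfl | hj), hq⟩)
      · exact Or.inl (Or.inl h)
      · exact Or.inl (Or.inr hq)
      · exact Or.inr ⟨j, hj, hq⟩

-- the three facts about A's running-max fold
theorem foldA_facts (l : List (List Char)) (a : Int) :
    a ≤ l.foldl (fun ans sub => if is_palindrome sub then max ans (sub.length : Int) else ans) a
    ∧ (∀ t ∈ l, is_palindrome t = true →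
        (t.length : Int) ≤ l.foldl (fun ans sub => if is_palindrome sub then max ans (sub.length : Int) else ans) a)
    ∧ (l.foldl (fun ans sub => if is_palindrome sub then max ans (sub.length : Int) else ans) a = a
        ∨ ∃ t ∈ l, is_palindrome t = true ∧
            l.foldl (fun ans sub => if is_palindrome sub then max ans (sub.length : Int) else ans) a = (t.length : Int)) := by
  induction l generalizing a with
  | nil => exact ⟨le_refl a, by simp, Or.inl rfl⟩
  | cons t rest ih =>
    simp only [List.foldl_cons]
    set a' := if is_palindrome t = true then max a (t.length : Int) else a with ha'
    obtain ⟨ih1, ih2, ih3⟩ := ih a'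
    have haa' : a ≤ a' := by
      rw [ha']; split_ifs
      · exact le_max_left _ _
      · exact le_refl a
    refine ⟨le_trans haa' ih1, ?_, ?_⟩
    · intro u hu hp
      rcases List.mem_cons.mp hu with rfl | hu
      · have h1 : (u.length : Int) ≤ a' := by rw [ha', if_pos hp]; exact le_max_right _ _
        exact le_trans h1 ih1
      · exact ih2 u hu hp
    · rcases ih3 with h | ⟨u, hu, hp, he⟩
      · rw [h, ha']
        split_ifs with hp
        · rcases max_choice a (t.length : Int) with hm | hm
          · exact Or.inl hm
          · exact Or.inr ⟨t, List.mem_cons_self, hp, hm⟩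
        · exact Or.inl rfl
      · exact Or.inr ⟨u, List.mem_cons_of_mem _ hu, hp, he⟩

theorem altOuter_cases (cl : List Char) (n : Int) (ls : List Int) :
    altOuter cl n ls = 1 ∨ (altOuter cl n ls ∈ ls ∧ rowPal cl n (altOuter cl n ls) = true) := by
  induction ls with
  | nil => simp [altOuter]
  | cons L rest ih =>
    by_cases h : rowPal cl n L = true
    · simp [altOuter, h]
    · simp only [altOuter, if_neg (by simp [h] : ¬(rowPal cl n L = true))]
      rcases ih with h1 | ⟨h1, h2⟩
      · exact Or.inl h1
      · exact Or.inr ⟨List.mem_cons_of_mem _ h1, h2⟩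

theorem altOuter_ge (cl : List Char) (n : Int) (ls : List Int)
    (hs : ls.Pairwise (fun x y => y < x)) :
    ∀ L ∈ ls, rowPal cl n L = true → L ≤ altOuter cl n ls := by
  induction ls with
  | nil => simp
  | cons L0 rest ih =>
    intro L hL hp
    rcases List.pairwise_cons.mp hs with ⟨hlt, hrest⟩
    by_cases h : rowPal cl n L0 = true
    · simp only [altOuter, if_pos h]
      rcases List.mem_cons.mp hL with rfl | hL'
      · exact le_refl _
      · exact le_of_lt (hlt L hL')
    · simp only [altOuter, if_neg (by simp [h] : ¬(rowPal cl n L0 = true))]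
      rcases List.mem_cons.mp hL with rfl | hL'
      · exact absurd hp h
      · exact ih hrest L hL' hp

-- an A-candidate of length L is B's cut at (L, i)
theorem candA_len_cut (cl : List Char) (i j : Int)
    (hi0 : 0 ≤ i) (hin : i < (cl.length : Int)) (hj0 : 0 ≤ j) :
    ((candA cl i j).length : Int) ≤ (cl.length : Int) - 1
    ∧ i ≤ ((candA cl i j).length : Int)
    ∧ cutB cl (cl.length : Int) ((candA cl i j).length : Int) i = candA cl i j := by
  have h1 : candA cl i j = cl.take i.toNat ++ cl.drop (i + j + 1).toNat := by
    unfold candA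
    rw [PySem.List.slice_zero_start, PySem.List.slice_to cl hi0, PySem.List.slice_from cl (by omega)]
  have hlen : (candA cl i j).length = i.toNat + (cl.length - (i + j + 1).toNat) := by
    rw [h1]
    simp [List.length_append, List.length_take, List.length_drop]
    omega
  refine ⟨by rw [hlen]; omega, by rw [hlen]; omega, ?_⟩
  unfold cutB
  rw [PySem.List.slice_to cl hi0, PySem.List.slice_from cl (by rw [hlen]; omega), h1]
  rw [h1] at hlen
  congr 1
  rcases Nat.lt_or_ge cl.length ((i + j + 1).toNat) with hNk | hkN
  · rw [List.drop_eq_nil_of_le (by rw [hlen]; omega), List.drop_eq_nil_of_le (by omega)]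
  · have heq : ((cl.length : Int) - ((List.take i.toNat cl ++ List.drop (i + j + 1).toNat cl).length : Int) + i).toNat = (i + j + 1).toNat := by
      rw [hlen]; omega
    rw [heq]

-- B's cut at (L, p) is A's candidate (p, n - 1 - L), of length L
theorem cutB_to_candA (cl : List Char) (L p : Int)
    (_hL1 : 1 ≤ L) (hLn : L ≤ (cl.length : Int) - 1) (hp0 : 0 ≤ p) (hpL : p ≤ L) :
    candA cl p ((cl.length : Int) - 1 - L) = cutB cl (cl.length : Int) L p
    ∧ ((cutB cl (cl.length : Int) L p).length : Int) = L := by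
  constructor
  · unfold candA cutB
    rw [show p + ((cl.length : Int) - 1 - L) + 1 = (cl.length : Int) - L + p from by ring]
    simp [PySem.List.slice_zero_start]
  · unfold cutB
    rw [PySem.List.slice_to cl hp0, PySem.List.slice_from cl (by omega)]
    simp [List.length_append, List.length_take, List.length_drop]
    omega

-- ===== VERDICT (by name: the statement is the Claim_ definition above) =====
theorem find_lps_length_spec : Claim_equal_find_lps_length := by
  intro s _
  show find_lps_length s = find_lps_length_alt s
  simp only [find_lps_length, find_lps_length_alt]
  set cl := s.toList with hcl
  set subs := (PySem.List.pyRange 0 ((cl.length : Int)) 1).foldl (fun acc i =>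
      (PySem.List.pyRange 0 ((cl.length : Int)) 1).foldl
        (fun acc2 j => PySem.Set.add acc2 (candA cl i j)) acc) PySem.Set.empty with hsubs
  have hg2 : ∀ (st : PySem.Set (List Char)) (i : Int) (x : List Char),
      x ∈ (PySem.List.pyRange 0 ((cl.length : Int)) 1).foldl
            (fun acc2 j => PySem.Set.add acc2 (candA cl i j)) st
        ↔ x ∈ st ∨ ∃ j ∈ PySem.List.pyRange 0 ((cl.length : Int)) 1, x = candA cl i j := by
    intro st i x
    exact mem_foldl_acc (fun acc2 j => PySem.Set.add acc2 (candA cl i j)) (fun j x => x = candA cl i j)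
      (fun s2 j x2 => PySem.Set.mem_add s2 (candA cl i j) x2) _ st x
  have hmem : ∀ x : List Char, x ∈ subs ↔
      ∃ i ∈ PySem.List.pyRange 0 ((cl.length : Int)) 1,
        ∃ j ∈ PySem.List.pyRange 0 ((cl.length : Int)) 1, x = candA cl i j := by
    intro x
    rw [hsubs, mem_foldl_acc _ (fun i x => ∃ j ∈ PySem.List.pyRange 0 ((cl.length : Int)) 1,
      x = candA cl i j) hg2 _ _ x]
    simp [PySem.Set.empty]
  obtain ⟨hA1, hA2, hA3⟩ := foldA_facts subs 1
  set ls := PySem.List.pyRange ((cl.length : Int) - 1) 0 (-1) with hls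
  have hpair : List.Pairwise (fun x y : Int => y < x) ls := by
    rw [hls, PySem.List.pyRange_neg_one_eq_reverse, List.pairwise_reverse]
    exact PySem.List.pairwise_lt_pyRange_one _ _
  have hge := altOuter_ge cl ((cl.length : Int)) ls hpair
  have hcase := altOuter_cases cl ((cl.length : Int)) ls
  have hrB1 : (1 : Int) ≤ altOuter cl ((cl.length : Int)) ls := by
    rcases hcase with h | ⟨hmemls, _⟩
    · rw [h]
    · have := PySem.List.mem_pyRange_neg_one.mp hmemls
      omega
  apply le_antisymm
  · rcases hA3 with h | ⟨t, htm, htp, he⟩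
    · rw [h]; exact hrB1
    · obtain ⟨i, hi, j, hj, rfl⟩ := (hmem t).mp htm
      rw [PySem.List.mem_pyRange_one] at hi hj
      obtain ⟨hc1, hc2, hc3⟩ := candA_len_cut cl i j hi.1 hi.2 hj.1
      have hL1 : (1 : Int) ≤ ((candA cl i j).length : Int) := he ▸ hA1
      have hrow : rowPal cl ((cl.length : Int)) ((candA cl i j).length : Int) = true := by
        unfold rowPal
        rw [List.any_eq_true]
        refine ⟨i, ?_, ?_⟩
        · rw [PySem.List.mem_pyRange_one]; exact ⟨hi.1, by omega⟩
        · rw [hc3, ← is_palindrome_eq]; exact htp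
      have hmemL : ((candA cl i j).length : Int) ∈ ls := by
        rw [hls, PySem.List.mem_pyRange_neg_one]; omega
      rw [he]
      exact hge _ hmemL hrow
  · rcases hcase with h | ⟨hmemls, hrow⟩
    · rw [h]; exact hA1
    · have hLb := PySem.List.mem_pyRange_neg_one.mp hmemls
      unfold rowPal at hrow
      rw [List.any_eq_true] at hrow
      obtain ⟨p, hp, hbeq⟩ := hrow
      rw [PySem.List.mem_pyRange_one] at hp
      obtain ⟨heq, hlen⟩ := cutB_to_candA cl (altOuter cl ((cl.length : Int)) ls) p
        (by omega) (by omega) hp.1 (by omega)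
      have htm : cutB cl ((cl.length : Int)) (altOuter cl ((cl.length : Int)) ls) p ∈ subs := by
        rw [hmem]
        refine ⟨p, by rw [PySem.List.mem_pyRange_one]; omega,
          ((cl.length : Int) - 1 - altOuter cl ((cl.length : Int)) ls),
          by rw [PySem.List.mem_pyRange_one]; omega, heq.symm⟩
      have htp : is_palindrome (cutB cl ((cl.length : Int)) (altOuter cl ((cl.length : Int)) ls) p) = true := by
        rw [is_palindrome_eq]; exact hbeq
      have hfin := hA2 _ htm htp
      rwa [hlen] at hfin
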